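-- pv_equiv track=rewrite | github.com/SergeiShumilin/shell_sort_analysis | new_shell_sort_analysis.py | hibbard
-- ===== SOURCE A (Python) =====
-- def hibbard(array):
--     i = 1
--     res = []
--     n = 0
--     while 2 ** i - 1 < len(array):
--         n = 2 ** i - 1
--         res.append(n)
--         i += 1
--     return list(reversed(res))
-- ===== SOURCE B (Python) =====
-- def hibbard(array):
--     n = len(array)
--     if n <= 1:
--         return []
--     g = (1 << (n.bit_length() - 1)) - 1
--     res = []
--     while g > 0:
--         res.append(g)
--         g = (g - 1) // 2
--     return res
-- ===== Notes on version B (the rewrite author's own statement) =====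
-- stated objective: alternative
-- what changed: B computes the largest Hibbard gap below n in closed form via bit_length and generates the gaps directly in descending order with g = (g-1)//2, instead of A's ascending loop that recomputes 2**i each step and then reverses the list.
import Mathlib
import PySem

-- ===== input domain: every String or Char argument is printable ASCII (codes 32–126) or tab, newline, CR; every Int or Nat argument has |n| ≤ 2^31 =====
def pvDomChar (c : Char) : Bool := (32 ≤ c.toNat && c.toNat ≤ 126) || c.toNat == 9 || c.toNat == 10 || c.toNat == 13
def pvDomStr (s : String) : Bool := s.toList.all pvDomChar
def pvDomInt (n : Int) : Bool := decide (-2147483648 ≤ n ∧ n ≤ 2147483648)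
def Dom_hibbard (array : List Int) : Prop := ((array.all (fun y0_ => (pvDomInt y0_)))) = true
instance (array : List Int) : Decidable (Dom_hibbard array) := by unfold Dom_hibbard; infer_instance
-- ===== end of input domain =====

-- ===== PORT A =====
-- A builds the ascending list of gaps 2^i - 1 < len(array) and reverses it at the end.
def hibbardAux (len : Nat) (i : Nat) (res : List Int) : List Int :=
  if (2:Int)^i - 1 < (len : Int) then
    hibbardAux len (i+1) (res ++ [(2:Int)^i - 1])
  else res
termination_by len - i
decreasing_by
  rename_i h
  have h2 : ((2:Nat)^i : Int) = (2:Int)^i := by push_cast; ring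
  have h3 : i < (2:Nat)^i := Nat.lt_two_pow_self
  have h4 : ((i:Nat) : Int) < ((2:Nat)^i : Int) := by exact_mod_cast h3
  have h5 : (i : Int) < (len : Int) := by rw [h2] at h4; omega
  have : i < len := by exact_mod_cast h5
  omega

def hibbard (array : List Int) : List Int :=
  (hibbardAux array.length 1 []).reverse

-- ===== PORT B =====
-- B: closed-form largest gap (Nat.log2 n = n.bit_length() - 1 for n >= 1), then descend by g := (g-1)//2.
def descendB (g : Nat) : List Int :=
  if g > 0 then (g : Int) :: descendB ((g - 1) / 2) else []
termination_by g
decreasing_by omega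

def hibbard_alt (array : List Int) : List Int :=
  let n := array.length
  if n ≤ 1 then []
  else descendB (2 ^ Nat.log2 n - 1)

-- ===== PRECONDITION & SPEC =====
def Spec_hibbard (array : List Int) (out : List Int) : Prop := out = hibbard_alt array
instance (array : List Int) (out : List Int) : Decidable (Spec_hibbard array out) := by unfold Spec_hibbard; infer_instance

-- ===== CLAIM (what is proved, stated in full; the proofs are below) =====
def Claim_equal_hibbard : Prop := ∀ (array : List Int), Dom_hibbard array → Spec_hibbard array (hibbard array)

-- ===== LEMMAS AND PROOFS =====

-- K len = number of gap indices + 1: the loop runs for i = 1 .. K len - 1.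
def pvK (len : Nat) : Nat := if len = 0 then 0 else Nat.log2 len + 1

def pvF (j : Nat) : Int := (2:Int)^j - 1

-- descending gap list [2^k-1, ..., 2^1-1]
def gapsL : Nat → List Int
  | 0 => []
  | k+1 => ((2:Int)^(k+1) - 1) :: gapsL k

lemma pvCond_iff (len i : Nat) : ((2:Int)^i - 1 < (len : Int)) ↔ i < pvK len := by
  have h2 : ((2:Nat)^i : Int) = (2:Int)^i := by push_cast; ring
  have hle : ((2:Int)^i - 1 < (len : Int)) ↔ (2:Nat)^i ≤ len := by
    rw [← h2]; constructor <;> intro h <;> [exact_mod_cast (by omega : ((2:Nat)^i : Int) ≤ (len:Int)); omega]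
  rw [hle]
  unfold pvK
  by_cases h0 : len = 0
  · subst h0; simp
  · simp only [h0, if_false, Nat.log2_eq_log_two, Nat.lt_succ_iff]
    exact (Nat.le_log_iff_pow_le (by norm_num) h0).symm

lemma hibbardAux_eq (len : Nat) (d : Nat) : ∀ i acc, pvK len - i = d →
    hibbardAux len i acc = acc ++ (List.range' i d).map pvF := by
  induction d with
  | zero =>
    intro i acc h
    rw [hibbardAux]
    have : ¬ ((2:Int)^i - 1 < (len : Int)) := by rw [pvCond_iff]; omega
    simp [this]
  | succ d ih =>
    intro i acc h
    rw [hibbardAux]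
    have : (2:Int)^i - 1 < (len : Int) := by rw [pvCond_iff]; omega
    rw [if_pos this, ih (i+1) _ (by omega), List.range'_succ]
    simp [pvF]

lemma gapsL_eq (k : Nat) : ((List.range' 1 k).map pvF).reverse = gapsL k := by
  induction k with
  | zero => simp [gapsL]
  | succ k ih =>
    have hc : List.range' 1 (k+1) = List.range' 1 k ++ [1+1*k] := List.range'_concat
    have h1k : 1+1*k = k+1 := by omega
    rw [hc, h1k]
    simp only [List.map_append, List.reverse_append, List.map_cons, List.map_nil,
      List.reverse_cons, List.reverse_nil, List.nil_append, List.cons_append]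
    rw [ih]
    rfl

lemma descendB_pow (k : Nat) : descendB (2^k - 1) = gapsL k := by
  induction k with
  | zero => rw [descendB]; simp [gapsL]
  | succ k ih =>
    have h1 : 1 ≤ (2:Nat)^k := Nat.one_le_two_pow
    have h2 : (2:Nat)^(k+1) = 2 * 2^k := by rw [Nat.pow_succ]; ring
    rw [descendB]
    have hpos : 2^(k+1) - 1 > 0 := by omega
    rw [if_pos hpos]
    have hstep : (2^(k+1) - 1 - 1) / 2 = 2^k - 1 := by
      have : 2^(k+1) - 1 - 1 = 2 * (2^k - 1) := by omega
      rw [this, Nat.mul_div_cancel_left _ (by norm_num)]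
    rw [hstep, ih]
    have hcast : ((2^(k+1) - 1 : Nat) : Int) = (2:Int)^(k+1) - 1 := by
      rw [Nat.cast_sub (by omega : 1 ≤ (2:Nat)^(k+1))]; push_cast; ring
    rw [gapsL, hcast]

lemma hibbard_eq_alt (array : List Int) : hibbard array = hibbard_alt array := by
  unfold hibbard hibbard_alt
  set n := array.length with hn
  by_cases h1 : n ≤ 1
  · have hK : pvK n - 1 = 0 := by
      unfold pvK
      interval_cases n <;> decide
    rw [hibbardAux_eq n 0 1 [] hK]
    simp [h1]
  · have hn0 : n ≠ 0 := by omega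
    have hK : pvK n = Nat.log2 n + 1 := by unfold pvK; simp [hn0]
    rw [hibbardAux_eq n (pvK n - 1) 1 [] rfl]
    simp only [List.nil_append]
    rw [if_neg h1, hK]
    simp only [Nat.add_sub_cancel]
    rw [gapsL_eq, descendB_pow]

-- ===== VERDICT (by name: the statement is the Claim_ definition above) =====
theorem hibbard_spec : Claim_equal_hibbard := by
  intro array _
  unfold Spec_hibbard
  exact hibbard_eq_alt array
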